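-- pv_equiv track=rewrite | github.com/petro-ew/test1 | solutions/19.py | funck2
-- ===== SOURCE A (Python) =====
-- def funck2(l1):
-- 	l = []
-- 	i = 0
-- 	while i < len(l1):
-- 		j = i + 1
-- 		while j < len(l1):
-- 			if l1[i] == l1[j][::-1]:
-- 				l.append((l1[i], l1[j]))
-- 			j += 1
-- 		i += 1
-- 	return l
-- ===== SOURCE B (Python) =====
-- def funck2(l1):
--     # One backward pass with a counting dict of the suffix already seen:
--     # at element s, every previously-seen occurrence of s[::-1] is a partner j > i,
--     # so the row for i is count copies of (s, s[::-1]).  Rows are then glued in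
--     # forward order.  O(n * L + output) instead of A's O(n^2 * L).
--     cnt = {}
--     rows = []
--     for s in reversed(l1):
--         r = s[::-1]
--         rows.append([(s, r)] * cnt.get(r, 0))
--         cnt[s] = cnt.get(s, 0) + 1
--     out = []
--     for row in reversed(rows):
--         out += row
--     return out
-- ===== Notes on version B (the rewrite author's own statement) =====
-- stated objective: faster
-- what changed: Replaces A's nested index scan with a single backward pass that keeps a dict counting suffix occurrences, emitting each row as count copies of (s, s[::-1]) and concatenating rows in forward order.
import Mathlib
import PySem

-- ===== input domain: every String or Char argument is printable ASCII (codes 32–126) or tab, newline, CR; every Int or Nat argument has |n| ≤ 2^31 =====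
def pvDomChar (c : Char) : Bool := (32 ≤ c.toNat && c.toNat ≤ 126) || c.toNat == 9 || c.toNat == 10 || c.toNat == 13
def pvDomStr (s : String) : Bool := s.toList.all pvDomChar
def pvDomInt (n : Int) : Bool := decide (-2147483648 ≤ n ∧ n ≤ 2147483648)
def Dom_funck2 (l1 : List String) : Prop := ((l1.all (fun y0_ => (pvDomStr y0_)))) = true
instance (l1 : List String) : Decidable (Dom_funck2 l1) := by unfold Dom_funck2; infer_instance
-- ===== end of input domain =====

-- B replaces A's O(n^2) nested scans by a single backward pass with a counting dict; return value proved equal.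

-- shared helper: s[::-1]; step = -1 ≠ 0, so Str.slice? is always `some` (exact per PySem.Str.slice?_none_none_neg_one)
def revStr (s : String) : String := (PySem.Str.slice? s none none (-1)).getD s

-- ===== PORT A =====
-- inner while loop: j = i+1 .. len-1, appending (l1[i], l1[j]) when l1[i] == l1[j][::-1]
def funck2Inner (l1 : List String) (s : String) (j : Nat) (acc : List (String × String)) :
    List (String × String) :=
  if h : j < l1.length then
    funck2Inner l1 s (j + 1) (if s == revStr l1[j] then acc ++ [(s, l1[j])] else acc)
  else acc
termination_by l1.length - j

-- outer while loop over i
def funck2Outer (l1 : List String) (i : Nat) (acc : List (String × String)) :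
    List (String × String) :=
  if h : i < l1.length then
    funck2Outer l1 (i + 1) (funck2Inner l1 l1[i] (i + 1) acc)
  else acc
termination_by l1.length - i

def funck2 (l1 : List String) : List (String × String) := funck2Outer l1 0 []

-- ===== PORT B =====
-- backward pass: for s in reversed(l1): rows.append([(s, s[::-1])] * cnt.get(s[::-1], 0)); cnt[s] += 1
def funck2AltStep (st : PySem.Dict String Nat × List (List (String × String))) (s : String) :
    PySem.Dict String Nat × List (List (String × String)) :=
  let r := revStr s
  (st.1.insert s (st.1.getD s 0 + 1), st.2 ++ [List.replicate (st.1.getD r 0) (s, r)])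

def funck2_alt (l1 : List String) : List (String × String) :=
  let p := l1.reverse.foldl funck2AltStep (PySem.Dict.empty, [])
  -- out = []; for row in reversed(rows): out += row
  p.2.reverse.foldl (fun out row => out ++ row) []

-- ===== PRECONDITION & SPEC =====
def Spec_funck2 (l1 : List String) (out : List (String × String)) : Prop := out = funck2_alt l1
instance (l1 : List String) (out : List (String × String)) : Decidable (Spec_funck2 l1 out) := by unfold Spec_funck2; infer_instance

-- ===== CLAIM (what is proved, stated in full; the proofs are below) =====
def Claim_equal_funck2 : Prop := ∀ (l1 : List String), Dom_funck2 l1 → Spec_funck2 l1 (funck2 l1)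

-- ===== LEMMAS AND PROOFS =====

-- common functional description: row for the head, then the tail's rows
def gSpec : List String → List (String × String)
  | [] => []
  | s :: t => List.replicate (t.count (revStr s)) (s, revStr s) ++ gSpec t

-- rows as B builds them (processing order = reversed input)
def rowsOf : List String → List (List (String × String))
  | [] => []
  | s :: t => rowsOf t ++ [List.replicate (t.count (revStr s)) (s, revStr s)]

theorem revStr_toList (s : String) : (revStr s).toList = s.toList.reverse := by
  simp [revStr, PySem.Str.slice?_none_none_neg_one]

theorem revStr_revStr (s : String) : revStr (revStr s) = s := by
  have h1 : (revStr (revStr s)).toList = s.toList := by simp [revStr_toList]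
  have h2 := congrArg String.ofList h1
  simpa using h2

theorem revStr_eq_iff (s u : String) : (s = revStr u) ↔ (u = revStr s) := by
  constructor
  · intro h; rw [h, revStr_revStr]
  · intro h; rw [h, revStr_revStr]

theorem funck2Inner_eq (l1 : List String) (s : String) :
    ∀ j acc, funck2Inner l1 s j acc =
      acc ++ List.replicate ((l1.drop j).count (revStr s)) (s, revStr s) := by
  intro j acc
  induction j, acc using funck2Inner.induct l1 s with
  | case1 j acc h ih =>
    rw [funck2Inner]
    simp only [dif_pos h]
    have hd : l1.drop j = l1[j] :: l1.drop (j + 1) := List.drop_eq_getElem_cons h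
    rw [hd, List.count_cons]
    by_cases hc : s = revStr l1[j]
    · have hl1j : l1[j] = revStr s := (revStr_eq_iff s l1[j]).mp hc
      have hbeq : (s == revStr l1[j]) = true := by simp [hc]
      simp only [hbeq, if_true, dite_true] at ih ⊢
      rw [ih]
      simp [hl1j, List.replicate_succ, List.append_assoc]
    · have hbeq : (s == revStr l1[j]) = false := by simp [hc]
      have hb : (l1[j] == revStr s) = false := by
        simp only [beq_eq_false_iff_ne, ne_eq]
        intro hh
        exact hc ((revStr_eq_iff s l1[j]).mpr hh)
      simp only [hbeq, Bool.false_eq_true, if_false, dite_false] at ih ⊢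
      rw [ih, hb]
      simp
  | case2 j acc h =>
    rw [funck2Inner]
    have hj : l1.length ≤ j := Nat.le_of_not_lt h
    simp [dif_neg h, List.drop_eq_nil_of_le hj]

theorem funck2Outer_eq (l1 : List String) :
    ∀ i acc, funck2Outer l1 i acc = acc ++ gSpec (l1.drop i) := by
  intro i acc
  induction i, acc using funck2Outer.induct l1 with
  | case1 i acc h ih =>
    rw [funck2Outer]
    simp only [dif_pos h]
    rw [ih, funck2Inner_eq]
    have hd : l1.drop i = l1[i] :: l1.drop (i + 1) := List.drop_eq_getElem_cons h
    rw [hd]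
    simp [gSpec]
  | case2 i acc h =>
    rw [funck2Outer]
    have hi : l1.length ≤ i := Nat.le_of_not_lt h
    simp [dif_neg h, List.drop_eq_nil_of_le hi, gSpec]

theorem funck2_eq_gSpec (l1 : List String) : funck2 l1 = gSpec l1 := by
  simpa using funck2Outer_eq l1 0 []

-- B's fold invariant: counts of the processed suffix, and the rows so far
theorem foldl_step_eq (t : List String) :
    (t.reverse.foldl funck2AltStep (PySem.Dict.empty, [])).2 = rowsOf t ∧
    ∀ k, (t.reverse.foldl funck2AltStep (PySem.Dict.empty, [])).1.getD k 0 = t.count k := by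
  induction t with
  | nil => simp [rowsOf, PySem.Dict.getD_empty]
  | cons s t ih =>
    obtain ⟨ih2, ih1⟩ := ih
    have hfold : (s :: t).reverse.foldl funck2AltStep (PySem.Dict.empty, []) =
        funck2AltStep (t.reverse.foldl funck2AltStep (PySem.Dict.empty, [])) s := by
      rw [List.reverse_cons, List.foldl_append]; rfl
    constructor
    · rw [hfold]
      simp only [funck2AltStep]
      rw [ih2, ih1]
      simp [rowsOf]
    · intro k
      rw [hfold]
      simp only [funck2AltStep]
      rw [PySem.Dict.getD_insert]
      by_cases hk : k = s
      · rw [if_pos hk, hk, ih1 s, List.count_cons]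
        simp
      · rw [if_neg hk, ih1 k, List.count_cons]
        simp
        exact fun hh => hk hh.symm

theorem foldl_append_flatten (L : List (List (String × String))) (acc : List (String × String)) :
    L.foldl (fun out row => out ++ row) acc = acc ++ L.flatten := by
  induction L generalizing acc with
  | nil => simp
  | cons r L ih => simp [List.foldl_cons, ih]

theorem rowsOf_reverse_flatten (t : List String) : (rowsOf t).reverse.flatten = gSpec t := by
  induction t with
  | nil => simp [rowsOf, gSpec]
  | cons s t ih => simp [rowsOf, gSpec, ih]

theorem funck2_alt_eq_gSpec (l1 : List String) : funck2_alt l1 = gSpec l1 := by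
  unfold funck2_alt
  rw [foldl_append_flatten, (foldl_step_eq l1).1, rowsOf_reverse_flatten]
  simp

-- ===== VERDICT (by name: the statement is the Claim_ definition above) =====
theorem funck2_spec : Claim_equal_funck2 := by
  intro l1 _
  unfold Spec_funck2
  rw [funck2_eq_gSpec, funck2_alt_eq_gSpec]
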